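-- pv_equiv track=rewrite | github.com/Kabix1/daily_coding | problem217/problem217.py | next_sparse_bit
-- ===== SOURCE A (Python) =====
-- def next_sparse_bit(n: int):
--     zero_count, one_count, last_one, first_zero, i = 0, 0, 0, 0, 0
--     first_zero_index = 0
--     bit = 1
--     while n >= bit:
--         if n & bit:
--             one_count += 1
--             zero_count = 0
--         else:
--             one_count = 0
--             zero_count += 1
--         if one_count >= 2:
--             last_one = bit
--             first_zero = 0
--         if zero_count >= 2 and last_one and not first_zero:
--             first_zero = bit >> 1
--             first_zero_index = i
--         bit <<= 1
--         i += 1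
--     if not last_one:
--         return n
--     if not first_zero:
--         return bit
--     else:
--         return (n >> first_zero_index << first_zero_index) + first_zero
-- ===== SOURCE B (Python) =====
-- def next_sparse_bit(n: int):
--     bits = []
--     m = n
--     while m > 0:
--         bits.append(m & 1)
--         m >>= 1
--     last11 = -1
--     for i in range(1, len(bits)):
--         if bits[i] and bits[i - 1]:
--             last11 = i
--     if last11 < 0:
--         return n
--     first00 = -1
--     for i in range(last11 + 1, len(bits)):
--         if not bits[i] and not bits[i - 1]:
--             first00 = i
--             break
--     if first00 < 0:
--         return 1 << len(bits)
--     return (n >> first00 << first00) + (1 << (first00 - 1))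
-- ===== Notes on version B (the rewrite author's own statement) =====
-- stated objective: alternative
-- what changed: Replaces A's single streaming pass with six run-length/state counters by materialising the binary digit list and running two separate scans over it: one pass recording the last adjacent-ones index, then a find-first search above it for an adjacent-zeros pair, reconstructing the result arithmetically.
import Mathlib
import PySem

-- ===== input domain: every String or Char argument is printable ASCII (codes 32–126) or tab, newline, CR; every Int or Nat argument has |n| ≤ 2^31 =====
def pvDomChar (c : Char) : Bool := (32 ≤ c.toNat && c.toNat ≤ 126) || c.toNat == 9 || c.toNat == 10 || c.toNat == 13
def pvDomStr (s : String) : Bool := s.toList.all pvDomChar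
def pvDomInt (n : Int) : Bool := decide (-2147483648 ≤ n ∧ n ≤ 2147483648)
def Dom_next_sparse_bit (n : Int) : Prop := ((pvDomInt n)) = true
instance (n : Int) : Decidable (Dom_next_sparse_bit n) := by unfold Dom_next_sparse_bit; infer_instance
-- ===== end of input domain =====

-- B re-implements next_sparse_bit by materialising the bit list and running two separate
-- list scans (last adjacent-ones pair, then first adjacent-zeros pair above it) instead of
-- A's single streaming pass with run-length counters; objective: alternative.


-- ===== PORT A =====
-- A's while loop, one let per Python assignment; Python's variable `bit` is carried through
-- its exponent k (bit = 2^k, `bit <<= 1` becomes k+1) so the loop is structurally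
-- terminating — every intermediate value is the same as Python's.  Returns the loop-carried
-- (last_one, first_zero, first_zero_index, bit) at exit.
def nsbLoop (n : Int) (zero_count one_count last_one first_zero : Int)
    (i : Nat) (first_zero_index : Nat) (k : Nat) : Int × Int × Nat × Int :=
  if _h : (2:Int)^k ≤ n then
    let bit : Int := 2^k
    let one_count' : Int := if PySem.Int.band n bit ≠ 0 then one_count + 1 else 0
    let zero_count' : Int := if PySem.Int.band n bit ≠ 0 then 0 else zero_count + 1
    let last_one' : Int := if one_count' ≥ 2 then bit else last_one
    let first_zero' : Int := if one_count' ≥ 2 then 0 else first_zero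
    let first_zero'' : Int :=
      if zero_count' ≥ 2 ∧ last_one' ≠ 0 ∧ first_zero' = 0 then bit >>> (1:Nat) else first_zero'
    let first_zero_index' : Nat :=
      if zero_count' ≥ 2 ∧ last_one' ≠ 0 ∧ first_zero' = 0 then i else first_zero_index
    nsbLoop n zero_count' one_count' last_one' first_zero'' (i + 1) first_zero_index' (k + 1)
  else
    (last_one, first_zero, first_zero_index, (2:Int)^k)
  termination_by ((n + 1 - (2:Int)^k).toNat)
  decreasing_by
    have h1 : (1:Int) ≤ 2^k := one_le_pow₀ (by norm_num)
    have h2 : (2:Int)^(k+1) = 2 * 2^k := by ring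
    rw [h2]; omega

def next_sparse_bit (n : Int) : Int :=
  match nsbLoop n 0 0 0 0 0 0 0 with
  | (last_one, first_zero, first_zero_index, bit) =>
    if last_one = 0 then n
    else if first_zero = 0 then bit
    else (n >>> first_zero_index <<< first_zero_index) + first_zero

-- ===== PORT B =====
-- Source B's first while loop: collect n's bits, least significant first.
def bitsOf (m : Int) : List Int :=
  if _h : 0 < m then PySem.Int.band m 1 :: bitsOf (m >>> (1:Nat)) else []
  termination_by m.toNat
  decreasing_by rw [Int.shiftRight_eq_div_pow]; omega

def next_sparse_bit_alt (n : Int) : Int :=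
  let bits := bitsOf n
  -- for i in range(1, len(bits)): if bits[i] and bits[i-1]: last11 = i
  let last11 : Int := (PySem.List.pyRange 1 (bits.length : Int)).foldl
    (fun acc i =>
      if PySem.List.pyGetD bits i 0 ≠ 0 ∧ PySem.List.pyGetD bits (i - 1) 0 ≠ 0 then i else acc)
    (-1)
  if last11 < 0 then n
  else
    -- for i in range(last11+1, len(bits)): … break  — the for/break search ported as find?
    match (PySem.List.pyRange (last11 + 1) (bits.length : Int)).find?
        (fun i => PySem.List.pyGetD bits i 0 == 0 && PySem.List.pyGetD bits (i - 1) 0 == 0) with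
    | none => (1 : Int) <<< bits.length
    | some i => (n >>> i.toNat <<< i.toNat) + ((1 : Int) <<< (i.toNat - 1))

-- ===== PRECONDITION & SPEC =====
def Spec_next_sparse_bit (n : Int) (out : Int) : Prop := out = next_sparse_bit_alt n
instance (n : Int) (out : Int) : Decidable (Spec_next_sparse_bit n out) := by unfold Spec_next_sparse_bit; infer_instance

-- ===== CLAIM (what is proved, stated in full; the proofs are below) =====
def Claim_equal_next_sparse_bit : Prop := ∀ (n : Int), Dom_next_sparse_bit n → Spec_next_sparse_bit n (next_sparse_bit n)

-- ===== LEMMAS AND PROOFS =====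

-- bit k of n, the reference notion both sides are reduced to
def nsbT (n : Int) (k : Nat) : Bool := n.toNat.testBit k

-- largest index j with 1 ≤ j < k whose bit and the bit below are both set
def nsbM (n : Int) : Nat → Option Nat
  | 0 => none
  | k + 1 => if 1 ≤ k ∧ nsbT n k = true ∧ nsbT n (k - 1) = true then some k else nsbM n k

-- A's first_zero search state after scanning bits < k: first 00-pair after the last 11-pair
def nsbF (n : Int) : Nat → Option Nat
  | 0 => none
  | k + 1 =>
    if 1 ≤ k ∧ nsbT n k = true ∧ nsbT n (k - 1) = true then none
    else if 1 ≤ k ∧ nsbT n k = false ∧ nsbT n (k - 1) = false ∧ (nsbM n k).isSome ∧ nsbF n k = none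
    then some k else nsbF n k

-- first index in [a, len) whose bit and the one below are both clear (forward search)
def nsbFF (n : Int) (len : Nat) (a : Nat) : Option Nat :=
  if _h : a < len then
    (if nsbT n a = false ∧ nsbT n (a - 1) = false then some a else nsbFF n len (a + 1))
  else none
  termination_by len - a

def encM : Option Nat → Int | none => 0 | some j => (2:Int)^j
def encF : Option Nat → Int | none => 0 | some i => (2:Int)^(i - 1)
def encJ : Option Nat → Int | none => -1 | some j => (j : Int)

lemma nsb_two_pow_le_iff (n : Int) (hn : 0 < n) (k : Nat) :
    ((2:Int)^k ≤ n ↔ k < PySem.Int.bitLength n) := by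
  have h1 := PySem.Int.lt_two_pow_bitLength n
  have h2 := PySem.Int.two_pow_bitLength_le n (by omega)
  have hna : n.natAbs = n.toNat := by omega
  rw [hna] at h1 h2
  constructor
  · intro h
    by_contra hk
    push Not at hk
    have hp : (2:Nat)^(PySem.Int.bitLength n) ≤ 2^k := Nat.pow_le_pow_right (by norm_num) hk
    have : (n.toNat : Int) < (2:Int)^k := by
      calc (n.toNat : Int) < ((2:Nat)^(PySem.Int.bitLength n) : Nat) := by exact_mod_cast h1
        _ ≤ (((2:Nat)^k : Nat) : Int) := by exact_mod_cast hp
        _ = (2:Int)^k := by push_cast; ring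
    omega
  · intro hk
    have hb : 1 ≤ PySem.Int.bitLength n := by omega
    have hp : (2:Nat)^k ≤ 2^(PySem.Int.bitLength n - 1) := Nat.pow_le_pow_right (by norm_num) (by omega)
    have : (2:Int)^k ≤ (n.toNat : Int) := by
      calc (2:Int)^k = (((2:Nat)^k : Nat) : Int) := by push_cast; ring
        _ ≤ ((2:Nat)^(PySem.Int.bitLength n - 1) : Nat) := by exact_mod_cast hp
        _ ≤ (n.toNat : Int) := by exact_mod_cast h2
    omega

lemma nsb_band_iff (n : Int) (hn : 0 ≤ n) (k : Nat) :
    (PySem.Int.band n ((2:Int)^k) ≠ 0 ↔ nsbT n k = true) := by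
  have hcast : n = ((n.toNat : Nat) : Int) := by omega
  rw [hcast]
  have h2 : ((2:Int)^k) = (((2^k : Nat) : Int)) := by push_cast; ring
  rw [h2, PySem.Int.band_natCast]
  rw [nsbT]
  simp [Nat.and_two_pow]
  congr 1
  omega

lemma nsb_shiftRight_one (n : Int) : n >>> (1:Nat) = PySem.Int.floordiv n 2 := by
  rw [Int.shiftRight_eq_div_pow]
  unfold PySem.Int.floordiv
  rw [Int.fdiv_eq_ediv]
  norm_num

lemma bitsOf_length (n : Int) (hn : 0 ≤ n) :
    (bitsOf n).length = PySem.Int.bitLength n := by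
  by_cases h : 0 < n
  · rw [bitsOf, dif_pos h, PySem.Int.bitLength_of_pos h, ← nsb_shiftRight_one]
    have hsh : 0 ≤ n >>> (1:Nat) := by rw [Int.shiftRight_eq_div_pow]; omega
    simp [bitsOf_length (n >>> (1:Nat)) hsh]
  · have hn0 : n = 0 := by omega
    subst hn0
    rw [bitsOf]
    norm_num [PySem.Int.bitLength_zero]
  termination_by n.toNat
  decreasing_by rw [Int.shiftRight_eq_div_pow]; omega

lemma bitsOf_getD (n : Int) (hn : 0 ≤ n) (k : Nat) (hk : k < (bitsOf n).length) :
    (bitsOf n).getD k 0 = if nsbT n k = true then 1 else 0 := by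
  induction k generalizing n with
  | zero =>
    have h : 0 < n := by
      by_contra h
      have : n = 0 := by omega
      subst this
      rw [bitsOf] at hk; simp at hk
    rw [bitsOf, dif_pos h]
    simp only [List.getD_cons_zero]
    rw [PySem.Int.band_one, nsbT, Nat.testBit_zero]
    have h1 := PySem.Int.mod_nonneg n (b := 2) (by norm_num)
    have h2 := PySem.Int.mod_lt n (b := 2) (by norm_num)
    have h3 : PySem.Int.mod n 2 = n % 2 := PySem.Int.mod_eq_emod_of_pos (by norm_num)
    split <;> rename_i hb <;> simp at hb <;> omega
  | succ k ih =>
    have h : 0 < n := by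
      by_contra h
      have : n = 0 := by omega
      subst this
      rw [bitsOf] at hk; simp at hk
    rw [bitsOf, dif_pos h] at hk ⊢
    simp only [List.getD_cons_succ, List.length_cons] at hk ⊢
    have hsh : 0 ≤ n >>> (1:Nat) := by rw [Int.shiftRight_eq_div_pow]; omega
    rw [ih (n >>> (1:Nat)) hsh (by omega)]
    have htb : nsbT (n >>> (1:Nat)) k = nsbT n (k+1) := by
      have : (n >>> (1:Nat)).toNat = n.toNat / 2 := by
        rw [Int.shiftRight_eq_div_pow]; omega
      rw [nsbT, nsbT, this, Nat.testBit_succ]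
    rw [htb]

lemma fold_last11 (n : Int) (hn : 0 < n) (k : Nat) (hk : k ≤ (bitsOf n).length) :
    ((PySem.List.pyRange 1 (k : Int)).foldl
      (fun acc i =>
        if PySem.List.pyGetD (bitsOf n) i 0 ≠ 0 ∧ PySem.List.pyGetD (bitsOf n) (i - 1) 0 ≠ 0
        then i else acc) (-1))
    = encJ (nsbM n k) := by
  induction k with
  | zero =>
    rw [PySem.List.pyRange_one_eq_nil (by norm_num)]
    rfl
  | succ k ih =>
    match k, hk with
    | 0, _ =>
      rw [PySem.List.pyRange_one_eq_nil (by norm_num)]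
      rfl
    | (k+1), hk =>
      have hcast : ((k + 2 : Nat) : Int) = ((k+1 : Nat) : Int) + 1 := by push_cast; ring
      rw [hcast, PySem.List.pyRange_one_succ_right (by push_cast; omega), List.foldl_append]
      rw [ih (by omega)]
      simp only [List.foldl_cons, List.foldl_nil]
      have h1 : PySem.List.pyGetD (bitsOf n) ((k+1 : Nat) : Int) 0 = (if nsbT n (k+1) = true then 1 else 0) := by
        rw [PySem.List.pyGetD_natCast]
        exact bitsOf_getD n (by omega) (k+1) (by omega)
      have h2 : PySem.List.pyGetD (bitsOf n) (((k+1 : Nat) : Int) - 1) 0 = (if nsbT n k = true then 1 else 0) := by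
        have : (((k+1 : Nat) : Int) - 1) = ((k : Nat) : Int) := by push_cast; ring
        rw [this, PySem.List.pyGetD_natCast]
        exact bitsOf_getD n (by omega) k (by omega)
      rw [h1, h2]
      show (if ((if nsbT n (k+1) = true then (1:Int) else 0) ≠ 0 ∧ (if nsbT n k = true then (1:Int) else 0) ≠ 0) then _ else _) = _
      have hm : nsbM n (k+1+1) = if 1 ≤ k+1 ∧ nsbT n (k+1) = true ∧ nsbT n (k+1-1) = true then some (k+1) else nsbM n (k+1) := rfl
      rw [hm]
      by_cases hb1 : nsbT n (k+1) = true <;> by_cases hb2 : nsbT n k = true <;>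
        simp [hb1, hb2, encJ]

lemma find_first00_aux (n : Int) (hn : 0 < n) :
    ∀ (d a : Nat), (bitsOf n).length - a = d → 1 ≤ a →
    ((PySem.List.pyRange (a : Int) ((bitsOf n).length : Int)).find?
      (fun i => PySem.List.pyGetD (bitsOf n) i 0 == 0 && PySem.List.pyGetD (bitsOf n) (i - 1) 0 == 0))
    = (nsbFF n (bitsOf n).length a).map (fun i => (i : Int)) := by
  intro d
  induction d with
  | zero =>
    intro a hd ha
    have hal : (bitsOf n).length ≤ a := by omega
    rw [PySem.List.pyRange_one_eq_nil (by exact_mod_cast hal)]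
    rw [nsbFF, dif_neg (by omega)]
    rfl
  | succ d ih =>
    intro a hd ha
    have hal : a < (bitsOf n).length := by omega
    rw [PySem.List.pyRange_one_cons (by exact_mod_cast hal), List.find?_cons]
    have h1 : PySem.List.pyGetD (bitsOf n) ((a : Nat) : Int) 0 = (if nsbT n a = true then 1 else 0) := by
      rw [PySem.List.pyGetD_natCast]
      exact bitsOf_getD n (by omega) a (by omega)
    have h2 : PySem.List.pyGetD (bitsOf n) (((a : Nat) : Int) - 1) 0 = (if nsbT n (a-1) = true then 1 else 0) := by
      have : (((a : Nat) : Int) - 1) = ((a - 1 : Nat) : Int) := by push_cast [ha]; ring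
      rw [this, PySem.List.pyGetD_natCast]
      exact bitsOf_getD n (by omega) (a-1) (by omega)
    rw [nsbFF, dif_pos hal]
    have hstep : ((a : Int) + 1) = ((a + 1 : Nat) : Int) := by push_cast; ring
    have ih' := ih (a+1) (by omega) (by omega)
    rw [h1, h2]
    by_cases hb1 : nsbT n a = true
    · have hp : ((if nsbT n a = true then (1:Int) else 0) == 0 && (if nsbT n (a-1) = true then (1:Int) else 0) == 0) = false := by
        simp [hb1]
      simp only [hp]
      rw [if_neg (by simp [hb1]), hstep]
      exact ih'
    · by_cases hb2 : nsbT n (a-1) = true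
      · have hp : ((if nsbT n a = true then (1:Int) else 0) == 0 && (if nsbT n (a-1) = true then (1:Int) else 0) == 0) = false := by
          simp [hb2]
        simp only [hp]
        rw [if_neg (by simp [hb2]), hstep]
        exact ih'
      · have hp : ((if nsbT n a = true then (1:Int) else 0) == 0 && (if nsbT n (a-1) = true then (1:Int) else 0) == 0) = true := by
          simp [hb1, hb2]
        simp only [hp]
        rw [if_pos ⟨by simpa using hb1, by simpa using hb2⟩]
        rfl

lemma nsbM_guard (n : Int) (m j : Nat) (h : nsbM n m = some j) :
    1 ≤ j ∧ nsbT n j = true ∧ nsbT n (j - 1) = true ∧ j < m := by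
  induction m with
  | zero => simp [nsbM] at h
  | succ m ih =>
    rw [nsbM] at h
    split at h
    · rename_i hg
      cases h
      exact ⟨hg.1, hg.2.1, hg.2.2, by omega⟩
    · have := ih h
      exact ⟨this.1, this.2.1, this.2.2.1, by omega⟩

lemma nsbM_no_guard_above (n : Int) (m j : Nat) (h : nsbM n m = some j) :
    ∀ k, j < k → k < m → ¬(1 ≤ k ∧ nsbT n k = true ∧ nsbT n (k - 1) = true) := by
  induction m with
  | zero => simp [nsbM] at h
  | succ m ih =>
    rw [nsbM] at h
    split at h
    · rename_i hg
      cases h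
      intro k hk1 hk2
      omega
    · rename_i hg
      intro k hk1 hk2
      rcases Nat.lt_succ_iff_lt_or_eq.mp hk2 with h' | h'
      · exact ih h k hk1 h'
      · subst h'; exact hg

lemma nsbM_stable (n : Int) (len j : Nat) (h : nsbM n len = some j) :
    ∀ k, j < k → k ≤ len → nsbM n k = some j := by
  intro k
  induction k with
  | zero => omega
  | succ k ih =>
    intro hjk hkl
    by_cases hjk' : j < k
    · have hg := nsbM_no_guard_above n len j h k hjk' (by omega)
      rw [nsbM, if_neg hg]
      exact ih hjk' (by omega)
    · have hje : j = k := by omega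
      subst hje
      have hg := nsbM_guard n len j h
      rw [nsbM, if_pos ⟨hg.1, hg.2.1, hg.2.2.1⟩]

lemma nsbFF_succ_top (n : Int) :
    ∀ (d k a : Nat), k - a = d → a ≤ k →
    nsbFF n (k+1) a = (match nsbFF n k a with
      | some i => some i
      | none => if nsbT n k = false ∧ nsbT n (k - 1) = false then some k else none) := by
  intro d
  induction d with
  | zero =>
    intro k a hd ha
    have hk : a = k := by omega
    subst hk
    rw [nsbFF, dif_pos (by omega), nsbFF, dif_neg (by omega)]
    rw [show nsbFF n a a = (none : Option Nat) by rw [nsbFF, dif_neg (by omega)]]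
  | succ d ih =>
    intro k a hd ha
    have hak : a < k := by omega
    rw [nsbFF, dif_pos (by omega)]
    rw [show nsbFF n k a = if nsbT n a = false ∧ nsbT n (a-1) = false then some a else nsbFF n k (a+1) by rw [nsbFF, dif_pos hak]]
    by_cases hc : nsbT n a = false ∧ nsbT n (a-1) = false
    · rw [if_pos hc, if_pos hc]
    · rw [if_neg hc, if_neg hc]
      exact ih k (a+1) (by omega) (by omega)

lemma nsbF_eq_FF (n : Int) (len j : Nat) (h : nsbM n len = some j) :
    nsbF n len = nsbFF n len (j + 1) := by
  have base := nsbM_guard n len j h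
  have main : ∀ k, j + 1 ≤ k → k ≤ len → nsbF n k = nsbFF n k (j + 1) := by
    intro k
    induction k with
    | zero => omega
    | succ k ih =>
      intro hjk hkl
      by_cases hjk' : j + 1 ≤ k
      · have hng := nsbM_no_guard_above n len j h k (by omega) (by omega)
        have hM : nsbM n k = some j := nsbM_stable n len j h k (by omega) (by omega)
        rw [nsbF, if_neg hng]
        rw [nsbFF_succ_top n (k - (j+1)) k (j+1) rfl (by omega)]
        rw [← ih hjk' (by omega)]
        by_cases hc : nsbT n k = false ∧ nsbT n (k-1) = false
        · cases hFk : nsbF n k with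
          | none =>
            rw [if_pos ⟨by omega, hc.1, hc.2, by simp [hM], rfl⟩]
            simp [hc]
          | some i =>
            rw [if_neg (by simp)]
        · rw [if_neg (by tauto)]
          cases hFk : nsbF n k with
          | none => exact (if_neg hc).symm
          | some i => rfl
      · have hje : k = j := by omega
        subst hje
        rw [nsbF, if_pos ⟨base.1, base.2.1, base.2.2.1⟩]
        rw [nsbFF, dif_neg (by omega)]
  exact main len (by omega) (by omega)

lemma encM_ne_zero (o : Option Nat) : encM o ≠ 0 ↔ o.isSome := by
  cases o <;> simp [encM]

lemma encF_eq_zero (o : Option Nat) : encF o = 0 ↔ o = none := by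
  cases o <;> simp [encF]

lemma two_pow_shift (k : Nat) (hk : 1 ≤ k) : ((2:Int)^k) >>> (1:Nat) = (2:Int)^(k-1) := by
  rw [Int.shiftRight_eq_div_pow]
  have : (2:Int)^k = (2:Int)^(k-1) * 2 := by
    rw [← pow_succ]; congr 1; omega
  rw [this]
  norm_num
lemma nsbLoop_spec (n : Int) (hn : 0 < n) :
    ∀ (cnt k : Nat) (zc oc lo fz : Int) (fzi : Nat),
      k + cnt = PySem.Int.bitLength n →
      0 ≤ oc → 0 ≤ zc →
      (oc ≥ 1 ↔ (1 ≤ k ∧ nsbT n (k - 1) = true)) →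
      (zc ≥ 1 ↔ (1 ≤ k ∧ nsbT n (k - 1) = false)) →
      lo = encM (nsbM n k) →
      fz = encF (nsbF n k) →
      (∀ i', nsbF n k = some i' → fzi = i') →
      (nsbLoop n zc oc lo fz k fzi k).1 = encM (nsbM n (PySem.Int.bitLength n)) ∧
      (nsbLoop n zc oc lo fz k fzi k).2.1 = encF (nsbF n (PySem.Int.bitLength n)) ∧
      (∀ i', nsbF n (PySem.Int.bitLength n) = some i' → (nsbLoop n zc oc lo fz k fzi k).2.2.1 = i') ∧
      (nsbLoop n zc oc lo fz k fzi k).2.2.2 = (2:Int)^(PySem.Int.bitLength n) := by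
  intro cnt
  induction cnt with
  | zero =>
    intro k zc oc lo fz fzi hk _ _ _ _ hlo hfz hfzi
    have hg : ¬ ((2:Int)^k ≤ n) := by
      rw [nsb_two_pow_le_iff n hn k]; omega
    have hkL : k = PySem.Int.bitLength n := by omega
    subst hkL
    rw [nsbLoop, dif_neg hg]
    refine ⟨by simpa using hlo, by simpa using hfz, ?_, rfl⟩
    intro i' h
    simpa using hfzi i' h
  | succ cnt ih =>
    intro k zc oc lo fz fzi hk hoc0 hzc0 hoc hzc hlo hfz hfzi
    have hg : (2:Int)^k ≤ n := (nsb_two_pow_le_iff n hn k).mpr (by omega)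
    have hband := nsb_band_iff n (by omega) k
    by_cases hT : nsbT n k = true
    · have hB : PySem.Int.band n ((2:Int)^k) ≠ 0 := hband.mpr hT
      have heq : nsbLoop n zc oc lo fz k fzi k
          = nsbLoop n 0 (oc + 1) (if oc + 1 ≥ 2 then (2:Int)^k else lo)
              (if oc + 1 ≥ 2 then 0 else fz) (k + 1) fzi (k + 1) := by
        rw [nsbLoop]
        simp [dif_pos hg, hB]
      rw [heq]
      by_cases hC : 1 ≤ k ∧ nsbT n (k-1) = true
      · have hoc1 : oc ≥ 1 := hoc.mpr hC
        have h2 : oc + 1 ≥ 2 := by omega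
        rw [if_pos h2, if_pos h2]
        have hM1 : nsbM n (k+1) = some k := by rw [nsbM, if_pos ⟨hC.1, hT, hC.2⟩]
        have hF1 : nsbF n (k+1) = none := by rw [nsbF, if_pos ⟨hC.1, hT, hC.2⟩]
        refine ih (k+1) 0 (oc+1) _ _ fzi (by omega) (by omega) (by omega) ?_ ?_ ?_ ?_ ?_
        · constructor
          · intro _; exact ⟨by omega, by rw [Nat.add_sub_cancel]; exact hT⟩
          · intro _; omega
        · constructor
          · intro h; omega
          · rintro ⟨-, h⟩; rw [Nat.add_sub_cancel, hT] at h; cases h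
        · rw [hM1]; rfl
        · rw [hF1]; rfl
        · rw [hF1]; intro i' h; cases h
      · have hoc1 : ¬ (oc ≥ 1) := fun h => hC (hoc.mp h)
        have h2 : ¬ (oc + 1 ≥ 2) := by omega
        rw [if_neg h2, if_neg h2]
        have hM1 : nsbM n (k+1) = nsbM n k := by
          rw [nsbM, if_neg (fun h => hC ⟨h.1, h.2.2⟩)]
        have hF1 : nsbF n (k+1) = nsbF n k := by
          rw [nsbF, if_neg (fun h => hC ⟨h.1, h.2.2⟩), if_neg (by rw [hT]; rintro ⟨-, h, -⟩; cases h)]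
        refine ih (k+1) 0 (oc+1) lo fz fzi (by omega) (by omega) (by omega) ?_ ?_ ?_ ?_ ?_
        · constructor
          · intro _; exact ⟨by omega, by rw [Nat.add_sub_cancel]; exact hT⟩
          · intro _; omega
        · constructor
          · intro h; omega
          · rintro ⟨-, h⟩; rw [Nat.add_sub_cancel, hT] at h; cases h
        · rw [hM1]; exact hlo
        · rw [hF1]; exact hfz
        · rw [hF1]; exact hfzi
    · have hB0 : ¬ (PySem.Int.band n ((2:Int)^k) ≠ 0) := fun h => hT (hband.mp h)
      have hTf : nsbT n k = false := by
        cases h : nsbT n k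
        · rfl
        · exact absurd h hT
      have heq : nsbLoop n zc oc lo fz k fzi k
          = nsbLoop n (zc + 1) 0 lo
              (if (zc + 1 ≥ 2 ∧ lo ≠ 0 ∧ fz = 0) then ((2:Int)^k) >>> (1:Nat) else fz)
              (k + 1)
              (if (zc + 1 ≥ 2 ∧ lo ≠ 0 ∧ fz = 0) then k else fzi) (k + 1) := by
        rw [nsbLoop]
        simp [dif_pos hg, hB0]
      rw [heq]
      have hcond : (zc + 1 ≥ 2 ∧ lo ≠ 0 ∧ fz = 0)
          ↔ (1 ≤ k ∧ nsbT n (k-1) = false ∧ (nsbM n k).isSome ∧ nsbF n k = none) := by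
        rw [hlo, hfz, encM_ne_zero, encF_eq_zero]
        constructor
        · rintro ⟨h1, h2, h3⟩
          have := hzc.mp (by omega)
          exact ⟨this.1, this.2, h2, h3⟩
        · rintro ⟨h1, h2, h3, h4⟩
          exact ⟨by have := hzc.mpr ⟨h1, h2⟩; omega, h3, h4⟩
      have hM1 : nsbM n (k+1) = nsbM n k := by
        rw [nsbM, if_neg (by rw [hTf]; rintro ⟨-, h, -⟩; cases h)]
      by_cases hS : 1 ≤ k ∧ nsbT n (k-1) = false ∧ (nsbM n k).isSome ∧ nsbF n k = none
      · rw [if_pos (hcond.mpr hS), if_pos (hcond.mpr hS)]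
        have hF1 : nsbF n (k+1) = some k := by
          rw [nsbF, if_neg (by rw [hTf]; rintro ⟨-, h, -⟩; cases h),
            if_pos ⟨hS.1, hTf, hS.2.1, hS.2.2.1, hS.2.2.2⟩]
        refine ih (k+1) (zc+1) 0 lo _ k (by omega) (by omega) (by omega) ?_ ?_ ?_ ?_ ?_
        · constructor
          · intro h; omega
          · rintro ⟨-, h⟩; rw [Nat.add_sub_cancel, hTf] at h; cases h
        · constructor
          · intro _; exact ⟨by omega, by rw [Nat.add_sub_cancel]; exact hTf⟩
          · intro _; omega
        · rw [hM1]; exact hlo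
        · rw [hF1, two_pow_shift k hS.1]; rfl
        · rw [hF1]; intro i' h; cases h; rfl
      · rw [if_neg (fun h => hS (hcond.mp h)), if_neg (fun h => hS (hcond.mp h))]
        have hF1 : nsbF n (k+1) = nsbF n k := by
          rw [nsbF, if_neg (by rw [hTf]; rintro ⟨-, h, -⟩; cases h), if_neg (by rw [hTf]; exact fun h => hS ⟨h.1, h.2.2.1, h.2.2.2⟩)]
        refine ih (k+1) (zc+1) 0 lo fz fzi (by omega) (by omega) (by omega) ?_ ?_ ?_ ?_ ?_
        · constructor
          · intro h; omega
          · rintro ⟨-, h⟩; rw [Nat.add_sub_cancel, hTf] at h; cases h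
        · constructor
          · intro _; exact ⟨by omega, by rw [Nat.add_sub_cancel]; exact hTf⟩
          · intro _; omega
        · rw [hM1]; exact hlo
        · rw [hF1]; exact hfz
        · rw [hF1]; exact hfzi

lemma nsbLoop_spec0 (n : Int) (hn : 0 < n) :
      (nsbLoop n 0 0 0 0 0 0 0).1 = encM (nsbM n (PySem.Int.bitLength n)) ∧
      (nsbLoop n 0 0 0 0 0 0 0).2.1 = encF (nsbF n (PySem.Int.bitLength n)) ∧
      (∀ i', nsbF n (PySem.Int.bitLength n) = some i' → (nsbLoop n 0 0 0 0 0 0 0).2.2.1 = i') ∧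
      (nsbLoop n 0 0 0 0 0 0 0).2.2.2 = (2:Int)^(PySem.Int.bitLength n) := by
  refine nsbLoop_spec n hn (PySem.Int.bitLength n) 0 0 0 0 0 0 (by omega) le_rfl le_rfl (by simp) (by simp) rfl rfl ?_
  intro i' h
  simp [nsbF] at h

lemma nsb_main (n : Int) : next_sparse_bit n = next_sparse_bit_alt n := by
  by_cases hn : 0 < n
  · have hlen := bitsOf_length n (by omega)
    obtain ⟨hA1, hA2, hA3, hA4⟩ := nsbLoop_spec0 n hn
    rcases hR : nsbLoop n 0 0 0 0 0 0 0 with ⟨a, b, c, d⟩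
    rw [hR] at hA1 hA2 hA3 hA4
    simp only at hA1 hA2 hA3 hA4
    rw [next_sparse_bit, hR]
    simp only [next_sparse_bit_alt]
    rw [fold_last11 n hn (bitsOf n).length le_rfl, hlen]
    cases hM : nsbM n (PySem.Int.bitLength n) with
    | none =>
      rw [hM] at hA1
      simp only [encM] at hA1
      subst hA1
      simp [encJ]
    | some j =>
      rw [hM] at hA1
      simp only [encM] at hA1
      subst hA1
      have hjlen : j + 1 ≤ PySem.Int.bitLength n := (nsbM_guard n _ j hM).2.2.2
      have hcast : ((j : Int) + 1) = ((j + 1 : Nat) : Int) := by push_cast; ring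
      rw [show encJ (some j) = (j:Int) from rfl, hcast, ← hlen, find_first00_aux n hn ((bitsOf n).length - (j+1)) (j+1) rfl (by omega)]
      rw [hlen, ← nsbF_eq_FF n (PySem.Int.bitLength n) j hM]
      have hane : ¬ ((2:Int)^j = 0) := by positivity
      rw [if_neg hane]
      rw [if_neg (show ¬ ((j:Int)) < 0 by simp)]
      cases hF : nsbF n (PySem.Int.bitLength n) with
      | none =>
        rw [hF] at hA2
        simp only [encF] at hA2
        subst hA2
        rw [if_pos rfl, hA4]
        simp [Int.shiftLeft_eq]
      | some i' =>
        rw [hF] at hA2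
        simp only [encF] at hA2
        subst hA2
        rw [if_neg (by positivity), hA3 i' hF]
        simp [Int.shiftLeft_eq]
  · have hA : nsbLoop n 0 0 0 0 0 0 0 = (0, 0, 0, 1) := by
      rw [nsbLoop, dif_neg (by norm_num; omega)]
      norm_num
    rw [next_sparse_bit, hA]
    have hb : bitsOf n = [] := by rw [bitsOf, dif_neg hn]
    simp only [next_sparse_bit_alt, hb]
    rw [show ((List.length ([] : List Int) : Int)) = 0 by simp]
    rw [PySem.List.pyRange_one_eq_nil (by norm_num)]
    simp

-- ===== VERDICT (by name: the statement is the Claim_ definition above) =====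
theorem next_sparse_bit_spec : Claim_equal_next_sparse_bit := by
  intro n _
  exact nsb_main n
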